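-- pv_equiv track=rewrite | github.com/TeraCyte-ai/notebooks-demo | teracyte_notebooks_utils/vizarr_viewer.py | _create_visual_grid
-- ===== SOURCE A (Python) =====
-- from typing import Dict, Tuple, List
--
-- def _create_visual_grid(rows: int, cols: int, fov_count: int) -> List[List[int]]:
--     """
--     Create the visual grid layout for button display.
--
--     Args:
--         rows (int): Number of rows
--         cols (int): Number of columns
--         fov_count (int): Total number of FOVs
--
--     Returns:
--         List[List[int]]: 2D list representing the visual grid layout
--     """
--     if rows == 6 and cols == 5:  # 4x magnification
--         return [
--             [0, 1, 2, 3, 4],        # First row: left to right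
--             [9, 8, 7, 6, 5],        # Second row: right to left
--             [10, 11, 12, 13, 14],   # Third row: left to right
--             [19, 18, 17, 16, 15],   # Fourth row: right to left
--             [20, 21, 22, 23, 24],   # Fifth row: left to right
--             [29, 28, 27, 26, 25]    # Sixth row: right to left
--         ]
--     else:  # 10x magnification or custom
--         visual_grid = []
--         fov_num = 0
--
--         for r in range(rows):
--             row = []
--             if r % 2 == 0:  # Even rows: left to right
--                 for c in range(cols):
--                     if fov_num < fov_count:
--                         row.append(fov_num)
--                         fov_num += 1
--             else:  # Odd rows: right to left
--                 temp_row = []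
--                 for c in range(cols):
--                     if fov_num < fov_count:
--                         temp_row.append(fov_num)
--                         fov_num += 1
--                 row = temp_row[::-1]  # Reverse for right to left
--
--             if row:  # Only add non-empty rows
--                 visual_grid.append(row)
--
--         return visual_grid
-- ===== SOURCE B (Python) =====
-- from typing import List
--
-- def _create_visual_grid(rows: int, cols: int, fov_count: int) -> List[List[int]]:
--     if rows == 6 and cols == 5:  # 4x magnification: fixed layout (ignores fov_count)
--         return [
--             [0, 1, 2, 3, 4],
--             [9, 8, 7, 6, 5],
--             [10, 11, 12, 13, 14],
--             [19, 18, 17, 16, 15],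
--             [20, 21, 22, 23, 24],
--             [29, 28, 27, 26, 25]
--         ]
--     if rows <= 0 or cols <= 0 or fov_count <= 0:
--         return []
--     total = min(fov_count, rows * cols)
--     flat = list(range(total))
--     chunks = [flat[i:i + cols] for i in range(0, total, cols)]
--     return [c[::-1] if r % 2 == 1 else c for r, c in enumerate(chunks)]
-- ===== Notes on version B (the rewrite author's own statement) =====
-- stated objective: faster
-- what changed: Replaces the threaded fov_num counter with per-cell inner loops over all rows*cols grid cells by building the flat index list once (total = min(fov_count, rows*cols)), slicing it into cols-sized chunks and reversing the odd-indexed chunks.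
import Mathlib
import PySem

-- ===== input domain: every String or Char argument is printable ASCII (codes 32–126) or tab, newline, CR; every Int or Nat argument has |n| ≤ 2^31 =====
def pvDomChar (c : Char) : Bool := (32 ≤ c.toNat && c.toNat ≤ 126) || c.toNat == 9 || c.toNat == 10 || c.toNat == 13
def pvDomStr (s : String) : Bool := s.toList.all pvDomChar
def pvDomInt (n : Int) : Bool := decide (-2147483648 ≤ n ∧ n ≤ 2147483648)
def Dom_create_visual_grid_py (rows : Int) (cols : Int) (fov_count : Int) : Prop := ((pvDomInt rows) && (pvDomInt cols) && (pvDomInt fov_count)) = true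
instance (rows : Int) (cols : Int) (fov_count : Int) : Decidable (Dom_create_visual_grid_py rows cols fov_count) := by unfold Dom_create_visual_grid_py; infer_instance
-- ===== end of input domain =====

-- B replaces A's threaded fov_num counter and per-cell loops over all rows*cols cells by building the
-- flat index list once (min(fov_count, rows*cols) entries) and slicing it into snake-order chunks (faster).


-- ===== PORT A =====
-- inner per-row loop of A: 'for c in range(cols): if fov_num < fov_count: row.append(fov_num); fov_num += 1'
def cvgInner (fov_count cols : Int) (fov_num : Int) : List Int × Int :=
  (PySem.List.pyRange 0 cols 1).foldl
    (fun st _ => if st.2 < fov_count then (st.1 ++ [st.2], st.2 + 1) else st)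
    ([], fov_num)

def create_visual_grid_py (rows : Int) (cols : Int) (fov_count : Int) : List (List Int) :=
  if rows == 6 && cols == 5 then
    [[0,1,2,3,4],[9,8,7,6,5],[10,11,12,13,14],[19,18,17,16,15],[20,21,22,23,24],[29,28,27,26,25]]
  else
    ((PySem.List.pyRange 0 rows 1).foldl
      (fun (st : List (List Int) × Int) r =>
        if PySem.Int.mod r 2 == 0 then  -- even rows: left to right
          let inner := cvgInner fov_count cols st.2
          let row := inner.1
          (if row ≠ [] then st.1 ++ [row] else st.1, inner.2)
        else  -- odd rows: right to left; temp_row[::-1] = reverse (PySem.List.slice?_none_none_neg_one)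
          let inner := cvgInner fov_count cols st.2
          let row := inner.1.reverse
          (if row ≠ [] then st.1 ++ [row] else st.1, inner.2))
      ([], 0)).1

-- ===== PORT B =====
def create_visual_grid_py_alt (rows : Int) (cols : Int) (fov_count : Int) : List (List Int) :=
  if rows == 6 && cols == 5 then
    [[0,1,2,3,4],[9,8,7,6,5],[10,11,12,13,14],[19,18,17,16,15],[20,21,22,23,24],[29,28,27,26,25]]
  else if rows ≤ 0 || cols ≤ 0 || fov_count ≤ 0 then
    []
  else
    let total := min fov_count (rows * cols)
    let flat := PySem.List.pyRange 0 total 1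
    let chunks := (PySem.List.pyRange 0 total cols).map
      (fun i => PySem.List.slice flat (some i) (some (i + cols)))
    (PySem.List.enumerate chunks).map
      (fun rc => if PySem.Int.mod rc.1 2 == 1 then rc.2.reverse else rc.2)

-- ===== PRECONDITION & SPEC =====
def Spec_create_visual_grid_py (rows : Int) (cols : Int) (fov_count : Int) (out : List (List Int)) : Prop := out = create_visual_grid_py_alt rows cols fov_count
instance (rows : Int) (cols : Int) (fov_count : Int) (out : List (List Int)) : Decidable (Spec_create_visual_grid_py rows cols fov_count out) := by unfold Spec_create_visual_grid_py; infer_instance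

-- ===== CLAIM (what is proved, stated in full; the proofs are below) =====
def Claim_equal_create_visual_grid_py : Prop := ∀ (rows : Int) (cols : Int) (fov_count : Int), Dom_create_visual_grid_py rows cols fov_count → Spec_create_visual_grid_py rows cols fov_count (create_visual_grid_py rows cols fov_count)

-- ===== LEMMAS AND PROOFS =====

-- the k-th snake row as a closed form: indices k*cols … min(fov,(k+1)*cols)-1, reversed on odd k
def cvgChunk (fov cols : Int) (k : Nat) : List Int :=
  PySem.List.pyRange ((k : Int) * cols) (min fov (((k : Int) + 1) * cols)) 1

def cvgRow (fov cols : Int) (k : Nat) : List Int :=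
  if k % 2 = 0 then cvgChunk fov cols k else (cvgChunk fov cols k).reverse

-- A's inner loop produces a contiguous range and the advanced counter
theorem cvgInner_aux (fov : Int) (l : List Int) (acc : List Int) (fn : Int) :
    l.foldl (fun st _ => if st.2 < fov then (st.1 ++ [st.2], st.2 + 1) else st) (acc, fn)
      = (acc ++ PySem.List.pyRange fn (max fn (min fov (fn + l.length))) 1,
         max fn (min fov (fn + l.length))) := by
  induction l generalizing acc fn with
  | nil =>
      have he : max fn (min fov (fn + (0 : Nat))) = fn := by push_cast; omega
      simp only [List.length_nil, List.foldl_nil, he,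
        PySem.List.pyRange_one_eq_nil (le_refl fn), List.append_nil]
  | cons x xs ih =>
      simp only [List.foldl_cons, List.length_cons]
      by_cases h : fn < fov
      · rw [if_pos h, ih]
        have he : max (fn + 1) (min fov (fn + 1 + (xs.length : Int)))
            = max fn (min fov (fn + ((xs.length + 1 : Nat) : Int))) := by push_cast; omega
        have h2 : fn < max fn (min fov (fn + ((xs.length + 1 : Nat) : Int))) := by push_cast; omega
        rw [he, ← List.singleton_append, List.append_assoc,
          PySem.List.pyRange_one_cons h2]
        simp
      · rw [if_neg h]
        have he : max fn (min fov (fn + ((xs.length + 1 : Nat) : Int))) = fn := by push_cast; omega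
        have he' : max fn (min fov (fn + (xs.length : Int))) = fn := by omega
        have := ih acc fn
        rw [he'] at this
        rw [he]
        simpa [PySem.List.pyRange_one_eq_nil (le_refl fn)] using this

theorem cvgInner_eq (fov cols fn : Int) :
    cvgInner fov cols fn
      = (PySem.List.pyRange fn (max fn (min fov (fn + max 0 cols))) 1,
         max fn (min fov (fn + max 0 cols))) := by
  have := cvgInner_aux fov (PySem.List.pyRange 0 cols 1) [] fn
  simpa [cvgInner, PySem.List.length_pyRange_one, max_comm] using this


-- slicing the flat range list is a contiguous sub-range
theorem slice_pyRange_eq (t i c : Int) (hi : 0 ≤ i) (hc : 0 ≤ c) :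
    PySem.List.slice (PySem.List.pyRange 0 t 1) (some i) (some (i + c))
      = PySem.List.pyRange i (min t (i + c)) 1 := by
  rw [PySem.List.slice_toNat _ hi (by omega)]
  apply List.ext_getElem
  · simp [PySem.List.length_pyRange_one]
    omega
  · intro j h1 h2
    simp only [List.getElem_take, List.getElem_drop, PySem.List.getElem_pyRange_one]
    simp [PySem.List.length_pyRange_one] at h1 h2 ⊢
    omega

-- the A-side fold invariant: after k rows, grid = nonempty snake rows 0..k-1, counter = min fov (k*cols)
theorem cvgA_inv (fov cols : Int) (hc : 0 < cols) (hf : 0 < fov) (k : Nat) :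
    (PySem.List.pyRange 0 k 1).foldl
      (fun (st : List (List Int) × Int) r =>
        if PySem.Int.mod r 2 == 0 then
          let inner := cvgInner fov cols st.2
          let row := inner.1
          (if row ≠ [] then st.1 ++ [row] else st.1, inner.2)
        else
          let inner := cvgInner fov cols st.2
          let row := inner.1.reverse
          (if row ≠ [] then st.1 ++ [row] else st.1, inner.2))
      ([], 0)
    = (((List.range k).map (cvgRow fov cols)).filter (· ≠ []), min fov ((k : Int) * cols)) := by
  induction k with
  | zero =>
      simp [PySem.List.pyRange_one_eq_nil (le_refl (0 : Int))]
      omega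
  | succ k ih =>
      have hcast : ((k + 1 : Nat) : Int) = (k : Int) + 1 := by push_cast; ring
      rw [hcast, PySem.List.pyRange_one_succ_right (by positivity), List.foldl_append, ih]
      simp only [List.foldl_cons, List.foldl_nil]
      -- evaluate the step at row index k with counter e = min fov (k*cols)
      have hmod : PySem.Int.mod (k : Int) 2 = ((k % 2 : Nat) : Int) := by
        exact_mod_cast PySem.Int.mod_natCast k 2
      have hinner := cvgInner_eq fov cols (min fov ((k : Int) * cols))
      have hmax : max (0 : Int) cols = cols := by omega
      rw [hmax] at hinner
      have hmul : ((k : Int) + 1) * cols = (k : Int) * cols + cols := by ring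
      have he' : max (min fov ((k : Int) * cols)) (min fov (min fov ((k : Int) * cols) + cols))
          = min fov (((k : Int) + 1) * cols) := by rw [hmul]; omega
      rw [he'] at hinner
      have hchunk : PySem.List.pyRange (min fov ((k : Int) * cols)) (min fov (((k : Int) + 1) * cols)) 1
          = cvgChunk fov cols k := by
        unfold cvgChunk
        by_cases hle : fov ≤ (k : Int) * cols
        · rw [PySem.List.pyRange_one_eq_nil (by rw [hmul]; omega),
            PySem.List.pyRange_one_eq_nil (by rw [hmul]; omega)]
        · rw [min_eq_right (by omega)]
      rw [hchunk] at hinner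
      rw [List.range_succ, List.map_append, List.filter_append]
      rcases Nat.even_or_odd k with hk | hk
      · have hk0 : k % 2 = 0 := Nat.even_iff.mp hk
        have : (PySem.Int.mod (k : Int) 2 == 0) = true := by rw [hmod, hk0]; rfl
        rw [this]
        simp only [if_true, hinner]
        have hrow : cvgRow fov cols k = cvgChunk fov cols k := by unfold cvgRow; rw [if_pos hk0]
        by_cases hne : cvgChunk fov cols k = []
        · simp [hne, hrow]
        · simp [hne, hrow]
      · have hk1 : k % 2 = 1 := Nat.odd_iff.mp hk
        have : (PySem.Int.mod (k : Int) 2 == 0) = false := by rw [hmod, hk1]; rfl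
        rw [this]
        simp only [Bool.false_eq_true, if_false, hinner]
        have hrow : cvgRow fov cols k = (cvgChunk fov cols k).reverse := by
          unfold cvgRow; rw [if_neg (by omega)]
        by_cases hne : cvgChunk fov cols k = []
        · simp [hne, hrow]
        · simp [hne, hrow]

-- m < ceil(t / c) ↔ c*m < t  (c > 0)
theorem lt_ceil_iff (t c : Int) (hc : 0 < c) (m : Nat) :
    m < ((t + c - 1) / c).toNat ↔ c * (m : Int) < t := by
  have h1 : (m : Int) + 1 ≤ (t + c - 1) / c ↔ ((m : Int) + 1) * c ≤ t + c - 1 :=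
    Int.le_ediv_iff_mul_le hc
  have h2 : ((m : Int) + 1) * c = (m : Int) * c + c := by ring
  have hcomm : c * (m : Int) = (m : Int) * c := mul_comm _ _
  omega

-- enumerate-then-map over a mapped range is a single map over the range
theorem enum_map_eq {a b : Type} (g : Nat -> a) (h : Int × a -> b) (n : Nat) :
    (PySem.List.enumerate ((List.range n).map g) 0).map h
      = (List.range n).map (fun k : Nat => h ((k : Int), g k)) := by
  apply List.ext_getElem
  · simp [PySem.List.length_enumerate]
  · intro j hj1 hj2
    simp [PySem.List.getElem_enumerate]

-- the B-side value in the general branch is the first N snake rows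
theorem cvgB_eq (rows cols fov : Int) (h65 : (rows == 6 && cols == 5) = false)
    (hr : 0 < rows) (hc : 0 < cols) (hf : 0 < fov) :
    create_visual_grid_py_alt rows cols fov
      = (List.range ((min fov (rows * cols) + cols - 1) / cols).toNat).map (cvgRow fov cols) := by
  have hg : (decide (rows ≤ 0) || decide (cols ≤ 0) || decide (fov ≤ 0)) = false := by
    simp only [Bool.or_eq_false_iff, decide_eq_false_iff_not, not_le]
    exact ⟨⟨hr, hc⟩, hf⟩
  have htotpos : (0 : Int) < min fov (rows * cols) := lt_min hf (mul_pos hr hc)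
  simp only [create_visual_grid_py_alt, h65, hg, Bool.false_eq_true, if_false]
  rw [PySem.List.pyRange_of_pos 0 (min fov (rows * cols)) hc, if_pos (by omega : (0:Int) < min fov (rows*cols))]
  rw [List.map_map, enum_map_eq]
  simp only [sub_zero]
  apply List.map_congr_left
  intro k hk
  simp only [List.mem_range] at hk
  have hck : cols * (k : Int) < min fov (rows * cols) := (lt_ceil_iff _ cols hc k).mp hk
  simp only [Function.comp, zero_add]
  rw [slice_pyRange_eq _ _ _ (by positivity) hc.le]
  have hkr : (k : Int) < rows := by
    have hcomm : cols * (k : Int) = (k : Int) * cols := mul_comm _ _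
    have h1 : (k : Int) * cols < rows * cols := by
      have := min_le_right fov (rows * cols); omega
    exact lt_of_mul_lt_mul_right h1 hc.le
  have hmin : min (min fov (rows * cols)) (cols * (k : Int) + cols) = min fov (((k : Int) + 1) * cols) := by
    have h2 : ((k : Int) + 1) * cols ≤ rows * cols := by nlinarith
    have hcomm : cols * (k : Int) = (k : Int) * cols := mul_comm _ _
    have hmul : ((k : Int) + 1) * cols = (k : Int) * cols + cols := by ring
    omega
  rw [hmin]
  have hmod : PySem.Int.mod (k : Int) 2 = ((k % 2 : Nat) : Int) := by
    exact_mod_cast PySem.Int.mod_natCast k 2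
  rcases Nat.even_or_odd k with hk2 | hk2
  · have hk0 : k % 2 = 0 := Nat.even_iff.mp hk2
    have hb : (PySem.Int.mod (k : Int) 2 == 1) = false := by rw [hmod, hk0]; rfl
    rw [hb]
    simp only [Bool.false_eq_true, if_false, mul_comm cols (k : Int)]
    unfold cvgRow cvgChunk
    rw [if_pos hk0]
  · have hk1 : k % 2 = 1 := Nat.odd_iff.mp hk2
    have hb : (PySem.Int.mod (k : Int) 2 == 1) = true := by rw [hmod, hk1]; rfl
    rw [hb]
    simp only [if_true, mul_comm cols (k : Int)]
    unfold cvgRow cvgChunk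
    rw [if_neg (by omega)]

-- within the first N rows the snake rows are nonempty, beyond them they are empty
theorem cvgRow_ne_nil (fov cols : Int) (hc : 0 < cols) (k : Nat)
    (hk : cols * (k : Int) < fov) : cvgRow fov cols k ≠ [] := by
  have h1 : (k : Int) * cols < min fov (((k : Int) + 1) * cols) := by
    have : (k : Int) * cols < ((k : Int) + 1) * cols := by nlinarith
    have hcomm : cols * (k : Int) = (k : Int) * cols := mul_comm _ _
    omega
  have hchunk : cvgChunk fov cols k ≠ [] := by
    unfold cvgChunk
    rw [PySem.List.pyRange_one_cons h1]
    exact List.cons_ne_nil _ _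
  unfold cvgRow
  split
  · exact hchunk
  · simpa using hchunk

theorem cvgRow_eq_nil (fov cols rows : Int) (hc : 0 < cols) (k : Nat)
    (hk : min fov (rows * cols) ≤ cols * (k : Int)) (hkr : (k : Int) < rows) :
    cvgRow fov cols k = [] := by
  have hlt : (k : Int) * cols < rows * cols := by nlinarith
  have hcomm : cols * (k : Int) = (k : Int) * cols := mul_comm _ _
  have hchunk : cvgChunk fov cols k = [] := by
    unfold cvgChunk
    exact PySem.List.pyRange_one_eq_nil (by
      have hmul : ((k : Int) + 1) * cols = (k : Int) * cols + cols := by ring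
      omega)
  unfold cvgRow
  split <;> simp [hchunk]

-- ===== VERDICT (by name: the statement is the Claim_ definition above) =====
theorem create_visual_grid_py_spec : Claim_equal_create_visual_grid_py := by
  intro rows cols fov _
  unfold Spec_create_visual_grid_py
  by_cases h65 : (rows == 6 && cols == 5) = true
  · unfold create_visual_grid_py create_visual_grid_py_alt
    rw [if_pos h65, if_pos h65]
  · have h65' : (rows == 6 && cols == 5) = false := by
      revert h65; cases (rows == 6 && cols == 5) <;> simp
    by_cases hgood : 0 < rows ∧ 0 < cols ∧ 0 < fov
    · obtain ⟨hr, hc, hf⟩ := hgood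
      rw [cvgB_eq rows cols fov h65' hr hc hf]
      unfold create_visual_grid_py
      rw [if_neg (by simp [h65'])]
      have hrtn : (rows.toNat : Int) = rows := Int.toNat_of_nonneg hr.le
      rw [show PySem.List.pyRange 0 rows 1 = PySem.List.pyRange 0 ((rows.toNat : Int)) 1 by
        rw [hrtn]]
      rw [cvgA_inv fov cols hc hf rows.toNat]
      have hNR : ((min fov (rows * cols) + cols - 1) / cols).toNat ≤ rows.toNat := by
        by_contra h'
        have h1 := (lt_ceil_iff (min fov (rows * cols)) cols hc rows.toNat).mp (by omega)
        rw [hrtn] at h1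
        have h2 : min fov (rows * cols) ≤ rows * cols := min_le_right _ _
        have hcomm : cols * rows = rows * cols := mul_comm _ _
        omega
      rw [show rows.toNat = ((min fov (rows * cols) + cols - 1) / cols).toNat
            + (rows.toNat - ((min fov (rows * cols) + cols - 1) / cols).toNat) by omega,
        List.range_add, List.map_append, List.filter_append]
      have h1 : (((List.range ((min fov (rows * cols) + cols - 1) / cols).toNat).map
            (cvgRow fov cols)).filter (· ≠ []))
          = (List.range ((min fov (rows * cols) + cols - 1) / cols).toNat).map (cvgRow fov cols) := by
        apply List.filter_eq_self.mpr
        intro x hx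
        simp only [List.mem_map, List.mem_range] at hx
        obtain ⟨k, hk, rfl⟩ := hx
        have hck := (lt_ceil_iff (min fov (rows * cols)) cols hc k).mp hk
        simpa using cvgRow_ne_nil fov cols hc k (by omega)
      have h2 : ((((List.range (rows.toNat - ((min fov (rows * cols) + cols - 1) / cols).toNat)).map
            (fun x => ((min fov (rows * cols) + cols - 1) / cols).toNat + x)).map
            (cvgRow fov cols)).filter (· ≠ [])) = [] := by
        apply List.filter_eq_nil_iff.mpr
        intro x hx
        simp only [List.map_map, List.mem_map, List.mem_range, Function.comp] at hx
        obtain ⟨j, hj, rfl⟩ := hx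
        have hge : min fov (rows * cols)
            ≤ cols * ((((min fov (rows * cols) + cols - 1) / cols).toNat + j : Nat) : Int) := by
          have := (lt_ceil_iff (min fov (rows * cols)) cols hc
            (((min fov (rows * cols) + cols - 1) / cols).toNat + j)).not.mp (by omega)
          omega
        have hlt : ((((min fov (rows * cols) + cols - 1) / cols).toNat + j : Nat) : Int) < rows := by
          omega
        simp [cvgRow_eq_nil fov cols rows hc _ hge hlt]
      rw [h1, h2, List.append_nil]
    · have halt : create_visual_grid_py_alt rows cols fov = [] := by
        unfold create_visual_grid_py_alt
        rw [if_neg (by simp [h65'])]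
        rw [if_pos (by simp only [Bool.or_eq_true, decide_eq_true_eq]; omega)]
      rw [halt]
      unfold create_visual_grid_py
      rw [if_neg (by simp [h65'])]
      by_cases hrneg : rows ≤ 0
      · rw [PySem.List.pyRange_one_eq_nil hrneg]
        rfl
      · have hinner : cvgInner fov cols 0 = ([], 0) := by
          rw [cvgInner_eq]
          have he : max (0 : Int) (min fov (0 + max 0 cols)) = 0 := by omega
          rw [he, PySem.List.pyRange_one_eq_nil (le_refl (0 : Int))]
        have hfold : ∀ l : List Int,
            l.foldl
              (fun (st : List (List Int) × Int) r =>
                if PySem.Int.mod r 2 == 0 then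
                  let inner := cvgInner fov cols st.2
                  let row := inner.1
                  (if row ≠ [] then st.1 ++ [row] else st.1, inner.2)
                else
                  let inner := cvgInner fov cols st.2
                  let row := inner.1.reverse
                  (if row ≠ [] then st.1 ++ [row] else st.1, inner.2))
              ([], 0) = ([], 0) := by
          intro l
          induction l with
          | nil => rfl
          | cons x xs ih =>
              rw [List.foldl_cons]
              simpa [hinner] using ih
        have h := hfold (PySem.List.pyRange 0 rows 1)
        simp at h ⊢
        rw [h]
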